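-- pv_equiv track=rewrite | github.com/artoj/meta.sr.ht | metasrht/types/sshkey.py | extract_b64_key
-- ===== SOURCE A (Python) =====
-- def extract_b64_key(data):
--     """Extract the base64 ssh key portion from an ssh public key.
--
--     This function is adapted from the python-sshpubkeys project[0]. It is
--     copied here because the sshpubkeys module currently has no public API to
--     get the base64 portion of a key. Some error checking in this function has
--     been edited out because this function should only be used when the key
--     has already been parsed by the SSHKey class from the sshpubkeys module
--     (which means this function was already called with error checking).
--
--     [0] https://github.com/ojarva/python-sshpubkeys/blob/9d6289c717a79dd8e49311af647877c95ebc41d3/sshpubkeys/keys.py#L204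
--     """
--     # Terribly inefficient way to remove options, but hey, it works.
--     if not data.startswith("ssh-") and not data.startswith("ecdsa-"):
--         quote_open = False
--         for i, character in enumerate(data):
--             if character == '"':  # only double quotes are allowed, no need to care about single quotes
--                 quote_open = not quote_open
--             if quote_open:
--                 continue
--             if character == " ":
--                 # Data begins after the first space
--                 data = data[i + 1:]
--                 break
--     key_parts = data.strip().split(None, 2)
--     return key_parts[1]
-- ===== SOURCE B (Python) =====
-- def extract_b64_key(data):
--     """Extract the base64 ssh key portion from an ssh public key.
--
--     Token-based re-implementation: split on single spaces and use a running
--     double-quote count to find the first unquoted space, instead of scanning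
--     character by character.
--     """
--     if not data.startswith("ssh-") and not data.startswith("ecdsa-"):
--         tokens = data.split(' ')
--         quotes = 0
--         for j in range(len(tokens) - 1):
--             quotes += tokens[j].count('"')
--             if quotes % 2 == 0:
--                 data = ' '.join(tokens[j + 1:])
--                 break
--     return data.strip().split(None, 2)[1]
-- ===== Notes on version B (the rewrite author's own statement) =====
-- stated objective: simpler
-- what changed: Replaces A's character-by-character scan with an explicit quote_open flag by a walk over the space-delimited tokens accumulating a running double-quote count; the remainder is rebuilt by joining the remaining tokens instead of slicing at a character index.
import Mathlib
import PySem

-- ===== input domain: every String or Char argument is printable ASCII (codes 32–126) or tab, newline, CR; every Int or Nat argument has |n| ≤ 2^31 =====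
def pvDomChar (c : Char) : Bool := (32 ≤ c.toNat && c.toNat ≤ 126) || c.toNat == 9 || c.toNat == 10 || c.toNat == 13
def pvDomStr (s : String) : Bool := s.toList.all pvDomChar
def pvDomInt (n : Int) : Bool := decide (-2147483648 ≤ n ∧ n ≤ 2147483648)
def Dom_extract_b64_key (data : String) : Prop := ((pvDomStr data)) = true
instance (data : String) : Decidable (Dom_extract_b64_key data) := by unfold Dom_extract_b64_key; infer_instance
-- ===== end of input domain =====

-- B replaces A's character-by-character option scan with a walk over the space-delimited tokens
-- using a running double-quote count (objective: simpler decomposition, same O(n) cost).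

-- ===== PORT A =====
-- the enumerate(data) loop; returns the chars after the cut
-- (some rest = 'data = data[i+1:]; break' with rest = the chars after index i), none = no break
def extract_b64_loop : List Char → Bool → Option (List Char)
  | [], _ => none
  | c :: rest, quote_open =>
    let q := if c = '"' then !quote_open else quote_open
    if q then extract_b64_loop rest q
    else if c = ' ' then some rest
    else extract_b64_loop rest q

def extract_b64_key (data : String) : String :=
  let data :=
    if !PySem.Str.startswith data "ssh-" && !PySem.Str.startswith data "ecdsa-" then
      match extract_b64_loop data.toList false with
      | some rest => String.ofList rest   -- data[i+1:] with 0 ≤ i+1 < len: exactly the chars after index i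
      | none => data
    else data
  let key_parts := PySem.Str.split₀Max (PySem.Str.strip data) 2
  (PySem.List.pyGet? key_parts 1).getD ""   -- key_parts[1]; the IndexError case is excluded by Pre_

-- ===== PORT B =====
-- the loop over range(len(tokens) - 1) accumulating quotes and breaking on even parity
def extract_b64_cut : List String → Nat → Option (List String)
  | [], _ => none
  | [_], _ => none
  | t :: u :: rest, quotes =>
    let q := quotes + PySem.Str.count t "\""
    if q % 2 = 0 then some (u :: rest) else extract_b64_cut (u :: rest) q

-- the data left once the options prefix (everything up to the first unquoted space) is removed
def b64Rest (data : String) : String :=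
  if !PySem.Str.startswith data "ssh-" && !PySem.Str.startswith data "ecdsa-" then
    let tokens := (PySem.Str.split? data " ").getD []   -- sep " " is nonempty, so split? is some
    match extract_b64_cut tokens 0 with
    | some rest => PySem.Str.join " " rest   -- join of tokens[j+1:]
    | none => data
  else data

def extract_b64_key_alt (data : String) : String :=
  (PySem.List.pyGet? (PySem.Str.split₀Max (PySem.Str.strip (b64Rest data)) 2) 1).getD ""

-- ===== PRECONDITION & SPEC =====
-- declarative description of the remainder: the chars after the first space preceded by an
-- even number of double quotes (no such space: the whole string); prefixed keys are untouched
def pvOptsRemoved (data : String) : List Char :=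
  if !PySem.Str.startswith data "ssh-" && !PySem.Str.startswith data "ecdsa-" then
    let toks := PySem.Chars.splitOn data.toList [' ']
    match (List.range (toks.length - 1)).find?
        (fun j => ((toks.take (j+1)).map (fun t => t.count '"')).sum % 2 == 0) with
    | some j => PySem.Chars.join [' '] (toks.drop (j+1))
    | none => data.toList
  else data.toList

-- Pre_ excludes exactly the inputs on which A raises IndexError: after option removal the key
-- has fewer than two whitespace-separated fields (B raises IndexError on the same inputs).
def Pre_extract_b64_key (data : String) : Prop :=
  2 ≤ (PySem.Chars.split₀Max (PySem.Chars.strip (pvOptsRemoved data)) 2).length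
instance (data : String) : Decidable (Pre_extract_b64_key data) := by
  unfold Pre_extract_b64_key; infer_instance

def pvWitness_extract_b64_key : String := "ssh-rsa AAAAB3Nza comment"

def Spec_extract_b64_key (data : String) (out : String) : Prop := out = extract_b64_key_alt data
instance (data : String) (out : String) : Decidable (Spec_extract_b64_key data out) := by unfold Spec_extract_b64_key; infer_instance

-- ===== CLAIM (what is proved, stated in full; the proofs are below) =====
def Claim_equal_extract_b64_key : Prop := ∀ (data : String), Dom_extract_b64_key data → Pre_extract_b64_key data → Spec_extract_b64_key data (extract_b64_key data)

-- ===== LEMMAS AND PROOFS =====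

-- a simple structural characterisation of splitting on a single space
def spSplit : List Char → List (List Char)
  | [] => [[]]
  | c :: r => if c = ' ' then [] :: spSplit r else (spSplit r).modifyHead (c :: ·)

theorem spSplit_space (r : List Char) : spSplit (' ' :: r) = [] :: spSplit r := by
  simp [spSplit]

theorem spSplit_cons (c : Char) (r : List Char) (hc : c ≠ ' ') :
    spSplit (c :: r) = (spSplit r).modifyHead (c :: ·) := by
  simp [spSplit, hc]

theorem spSplit_ne_nil (cs : List Char) : spSplit cs ≠ [] := by
  induction cs with
  | nil => simp [spSplit]
  | cons c r ih =>
    by_cases hc : c = ' '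
    · subst hc; simp [spSplit_space]
    · rw [spSplit_cons c r hc]
      cases h : spSplit r with
      | nil => exact absurd h ih
      | cons p ps => simp [List.modifyHead]

theorem splitOn_go_eq (fuel : Nat) (l cur : List Char) (acc : List (List Char))
    (h : l.length < fuel) :
    PySem.Chars.splitOn.go [' '] fuel l cur acc
      = acc.reverse ++ (spSplit l).modifyHead (cur.reverse ++ ·) := by
  induction fuel generalizing l cur acc with
  | zero => omega
  | succ fuel ih =>
    cases l with
    | nil => simp [PySem.Chars.splitOn.go, spSplit]
    | cons c r =>
      by_cases hc : c = ' '
      · subst hc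
        rw [show PySem.Chars.splitOn.go [' '] (fuel+1) (' ' :: r) cur acc
              = PySem.Chars.splitOn.go [' '] fuel r [] (cur.reverse :: acc) by
            simp [PySem.Chars.splitOn.go, List.isPrefixOf]]
        rw [ih r [] (cur.reverse :: acc) (by simpa using Nat.lt_of_succ_lt_succ h)]
        rw [spSplit_space]
        cases h' : spSplit r <;> simp [List.modifyHead]
      · rw [show PySem.Chars.splitOn.go [' '] (fuel+1) (c :: r) cur acc
              = PySem.Chars.splitOn.go [' '] fuel r (c :: cur) acc by
            simp [PySem.Chars.splitOn.go, List.isPrefixOf, Ne.symm hc]]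
        rw [ih r (c :: cur) acc (by simpa using Nat.lt_of_succ_lt_succ h)]
        rw [spSplit_cons c r hc]
        cases h' : spSplit r with
        | nil => exact absurd h' (spSplit_ne_nil r)
        | cons p ps => simp [List.modifyHead]

theorem splitOn_space_eq (cs : List Char) :
    PySem.Chars.splitOn cs [' '] = spSplit cs := by
  rw [PySem.Chars.splitOn, splitOn_go_eq (cs.length + 1) cs [] [] (by omega)]
  cases h : spSplit cs with
  | nil => exact absurd h (spSplit_ne_nil cs)
  | cons p ps => simp [List.modifyHead]

theorem join_spSplit (cs : List Char) :
    PySem.Chars.join [' '] (spSplit cs) = cs := by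
  induction cs with
  | nil => simp [spSplit, PySem.Chars.join, List.intercalate]
  | cons c r ih =>
    by_cases hc : c = ' '
    · subst hc
      rw [spSplit_space]
      cases h : spSplit r with
      | nil => exact absurd h (spSplit_ne_nil r)
      | cons p ps =>
        rw [h] at ih
        rw [PySem.Chars.join_cons_cons]
        simpa using ih
    · rw [spSplit_cons c r hc]
      cases h : spSplit r with
      | nil => exact absurd h (spSplit_ne_nil r)
      | cons p ps =>
        rw [h] at ih
        cases ps with
        | nil =>
          rw [PySem.Chars.join_singleton] at ih
          simp [List.modifyHead, PySem.Chars.join_singleton, ih]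
        | cons p2 ps2 =>
          rw [PySem.Chars.join_cons_cons] at ih
          simp only [List.modifyHead]
          rw [PySem.Chars.join_cons_cons]
          simp [← ih]

theorem spSplit_no_space (cs : List Char) : ∀ p ∈ spSplit cs, ' ' ∉ p := by
  induction cs with
  | nil => simp [spSplit]
  | cons c r ih =>
    by_cases hc : c = ' '
    · subst hc; rw [spSplit_space]; simpa using ih
    · rw [spSplit_cons c r hc]
      cases h : spSplit r with
      | nil => exact absurd h (spSplit_ne_nil r)
      | cons p ps =>
        rw [h] at ih
        intro q hq
        simp [List.modifyHead] at hq
        rcases hq with rfl | hq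
        · intro hm
          rcases List.mem_cons.mp hm with rfl | hm
          · exact hc rfl
          · exact ih p (by simp) hm
        · exact ih q (by simp [hq])

-- count of a single-character pattern
theorem count_go_single (c : Char) (fuel : Nat) (l : List Char) (acc : Nat)
    (h : l.length ≤ fuel) :
    PySem.Chars.count.go [c] fuel l acc = acc + l.count c := by
  induction fuel generalizing l acc with
  | zero =>
    cases l with
    | nil => simp [PySem.Chars.count.go]
    | cons x r => simp at h
  | succ fuel ih =>
    cases l with
    | nil => simp [PySem.Chars.count.go]
    | cons x r =>
      by_cases hx : x = c
      · subst hx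
        rw [show PySem.Chars.count.go [x] (fuel+1) (x :: r) acc
              = PySem.Chars.count.go [x] fuel r (acc + 1) by
            simp [PySem.Chars.count.go, List.isPrefixOf]]
        rw [ih r (acc + 1) (by simpa using Nat.le_of_succ_le_succ h)]
        simp
        omega
      · rw [show PySem.Chars.count.go [c] (fuel+1) (x :: r) acc
              = PySem.Chars.count.go [c] fuel r acc by
            simp [PySem.Chars.count.go, List.isPrefixOf, Ne.symm hx]]
        rw [ih r acc (by simpa using Nat.le_of_succ_le_succ h)]
        simp [hx]

theorem chars_count_single (l : List Char) (c : Char) :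
    PySem.Chars.count l [c] = l.count c := by
  simp [PySem.Chars.count, count_go_single c l.length l 0 (le_refl _)]

-- A's loop on a single non-space, non-cut character
theorem loop_step (c : Char) (cs : List Char) (b : Bool) (hc : c ≠ ' ') :
    extract_b64_loop (c :: cs) b = extract_b64_loop cs (if c = '"' then !b else b) := by
  simp only [extract_b64_loop]
  rw [if_neg hc]
  split <;> exact (ite_self _)

theorem loop_space (cs : List Char) (b : Bool) :
    extract_b64_loop (' ' :: cs) b = if b then extract_b64_loop cs b else some cs := by
  simp [extract_b64_loop]

-- A's quote state after scanning a chunk with no space: a fold of toggles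
theorem loop_append_no_space (t : List Char) (ht : ' ' ∉ t) (ds : List Char) (b : Bool) :
    extract_b64_loop (t ++ ds) b
      = extract_b64_loop ds (t.foldl (fun s c => if c = '"' then !s else s) b) := by
  induction t generalizing b with
  | nil => simp
  | cons c r ih =>
    have hc : c ≠ ' ' := fun h => ht (by simp [h])
    have ht' : ' ' ∉ r := fun h => ht (by simp [h])
    rw [List.cons_append, loop_step c (r ++ ds) b hc, List.foldl_cons]
    exact ih ht' _

theorem toggle_fold_eq_parity (t : List Char) (b : Bool) :
    t.foldl (fun s c => if c = '"' then !s else s) b = xor b (decide (t.count '"' % 2 = 1)) := by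
  induction t generalizing b with
  | nil => simp
  | cons c r ih =>
    simp only [List.foldl_cons, List.count_cons, ih]
    by_cases hc : c = '"'
    · subst hc
      rcases Nat.mod_two_eq_zero_or_one (r.count '"') with h1 | h1 <;>
        simp [h1, Nat.add_mod, Bool.xor_comm]
    · simp [hc]

-- char-list mirror of extract_b64_cut
def cutL : List (List Char) → Nat → Option (List (List Char))
  | [], _ => none
  | [_], _ => none
  | t :: u :: rest, quotes =>
    let q := quotes + t.count '"'
    if q % 2 = 0 then some (u :: rest) else cutL (u :: rest) q

theorem cut_eq_cutL (toks : List (List Char)) (q : Nat) :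
    extract_b64_cut (toks.map String.ofList) q = (cutL toks q).map (List.map String.ofList) := by
  induction toks generalizing q with
  | nil => simp [extract_b64_cut, cutL]
  | cons t rest ih =>
    cases rest with
    | nil => simp [extract_b64_cut, cutL]
    | cons u rest2 =>
      simp only [List.map_cons, extract_b64_cut, cutL]
      have hcnt : PySem.Str.count (String.ofList t) "\"" = t.count '"' := by
        simp [PySem.Str.count, chars_count_single]
      rw [hcnt]
      split
      · simp
      · exact ih _

-- the main correspondence: A's char loop over the joined tokens = B's token loop
theorem loop_eq_cutL (toks : List (List Char)) (hs : ∀ p ∈ toks, ' ' ∉ p) (q : Nat) :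
    extract_b64_loop (PySem.Chars.join [' '] toks) (decide (q % 2 = 1))
      = (cutL toks q).map (PySem.Chars.join [' ']) := by
  induction toks generalizing q with
  | nil => simp [PySem.Chars.join, List.intercalate, extract_b64_loop, cutL]
  | cons t rest ih =>
    cases rest with
    | nil =>
      rw [PySem.Chars.join_singleton]
      have h0 : extract_b64_loop (t ++ []) (decide (q % 2 = 1)) = none := by
        rw [loop_append_no_space t (hs t (by simp)) [] _]
        simp [extract_b64_loop]
      simpa [cutL] using h0
    | cons u rest2 =>
      rw [PySem.Chars.join_cons_cons, List.append_assoc]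
      rw [loop_append_no_space t (hs t (by simp)) _ _, toggle_fold_eq_parity]
      have hpar : xor (decide (q % 2 = 1)) (decide (t.count '"' % 2 = 1))
          = decide ((q + t.count '"') % 2 = 1) := by
        rcases Nat.mod_two_eq_zero_or_one q with h1 | h1 <;>
          rcases Nat.mod_two_eq_zero_or_one (t.count '"') with h2 | h2 <;>
            simp [h1, h2, Nat.add_mod]
      rw [hpar]
      rw [show ([' '] ++ PySem.Chars.join [' '] (u :: rest2))
            = ' ' :: PySem.Chars.join [' '] (u :: rest2) from rfl, loop_space]
      simp only [cutL]
      by_cases hq : (q + t.count '"') % 2 = 0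
      · rw [show (decide ((q + t.count '"') % 2 = 1)) = false by simp [hq], if_pos hq]
        simp
      · have h1 : (q + t.count '"') % 2 = 1 := by omega
        rw [show (decide ((q + t.count '"') % 2 = 1)) = true by simp [h1], if_neg hq]
        simp only [if_true]
        have hih := ih (fun p hp => hs p (by simp [hp])) (q + t.count '"')
        rw [show (decide ((q + t.count '"') % 2 = 1)) = true by simp [h1]] at hih
        exact hih

-- the two option-removal phases produce the same remaining string
theorem rest_eq (data : String) :
    (match extract_b64_loop data.toList false with
     | some rest => String.ofList rest
     | none => data)
    = (match extract_b64_cut ((PySem.Str.split? data " ").getD []) 0 with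
       | some rest => PySem.Str.join " " rest
       | none => data) := by
  have htoks : (PySem.Str.split? data " ").getD [] = (spSplit data.toList).map String.ofList := by
    simp [PySem.Str.split?, PySem.Chars.split?, splitOn_space_eq]
  rw [htoks, cut_eq_cutL]
  have hloop := loop_eq_cutL (spSplit data.toList) (spSplit_no_space data.toList) 0
  rw [show (decide ((0:Nat) % 2 = 1)) = false by decide, join_spSplit] at hloop
  rw [hloop]
  cases h : cutL (spSplit data.toList) 0 with
  | none => simp
  | some rest =>
    simp [PySem.Str.join, List.map_map, Function.comp_def, String.toList_ofList]

-- both ports compute the same remainder, hence the same result, on every input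
theorem ports_agree (data : String) : extract_b64_key data = extract_b64_key_alt data := by
  unfold extract_b64_key extract_b64_key_alt b64Rest
  by_cases hp : (!PySem.Str.startswith data "ssh-" && !PySem.Str.startswith data "ecdsa-") = true
  · simp only [if_pos hp]
    rw [rest_eq data]
  · simp only [if_neg hp]

-- ===== VERDICT (by name: the statement is the Claim_ definition above) =====
theorem extract_b64_key_spec : Claim_equal_extract_b64_key := by
  intro data _ _
  unfold Spec_extract_b64_key
  exact ports_agree data
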